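-- pv_equiv track=rewrite | github.com/harika33333/Python-Exercises | Strings_Exercises/strings_6.py | my_patt
-- ===== SOURCE A (Python) =====
-- def my_patt(s1,s2):
--
--     s3=""
--     if len(s1)>=len(s2):
--         c=len(s2)-1
--         for i in range(len(s2)):
--             s3=s3+s1[i]+s2[c]
--             c=c-1
--         s3=s3+s1[len(s2):]+s2[len(s1):]
--     else:
--         c=len(s1)-1
--         for i in range(len(s1)):
--             s3=s3+s1[i]+s2[c]
--             c=c-1
--         s3=s3+s2[len(s1):]
--     return(s3)
-- ===== SOURCE B (Python) =====
-- def my_patt(s1, s2):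
--     n = min(len(s1), len(s2))
--     out = [''] * (2 * n)
--     out[0::2] = s1[:n]
--     out[1::2] = s2[:n][::-1]
--     tail = s1[n:] if len(s1) > n else s2[n:]
--     return ''.join(out) + tail
-- ===== Notes on version B (the rewrite author's own statement) =====
-- stated objective: faster
-- what changed: B replaces A's branch with two decrementing-counter loops that grow the result by repeated string concatenation with a preallocated length-2n buffer filled by two extended-slice scatter assignments (s1's prefix into the even positions, s2's reversed prefix into the odd positions), joined once, plus the longer string's leftover tail.
import Mathlib
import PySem

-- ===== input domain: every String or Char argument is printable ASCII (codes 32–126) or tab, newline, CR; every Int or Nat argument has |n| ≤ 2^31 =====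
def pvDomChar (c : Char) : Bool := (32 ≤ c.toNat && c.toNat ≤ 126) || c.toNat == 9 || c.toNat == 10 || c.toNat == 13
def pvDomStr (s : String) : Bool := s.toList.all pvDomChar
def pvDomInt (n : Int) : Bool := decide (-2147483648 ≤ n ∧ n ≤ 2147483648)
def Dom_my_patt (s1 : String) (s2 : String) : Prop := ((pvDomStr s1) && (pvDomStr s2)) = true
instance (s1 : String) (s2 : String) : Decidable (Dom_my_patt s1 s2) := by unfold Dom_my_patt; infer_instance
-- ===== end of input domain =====

-- B replaces A's two counter loops with repeated concatenation by a preallocated buffer filled via strided scatter writes; objective: faster.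

-- ===== PORT A =====
-- literal port of A: compare lengths, then a counting-up loop with a counting-down index c, then slice tails
def my_patt (s1 : String) (s2 : String) : String :=
  let l1 := s1.toList
  let l2 := s2.toList
  if l1.length ≥ l2.length then
    let st := (PySem.List.pyRange 0 (l2.length : Int) 1).foldl
      (fun (p : List Char × Int) i =>
        (p.1 ++ [PySem.List.pyGetD l1 i ' '] ++ [PySem.List.pyGetD l2 p.2 ' '], p.2 - 1))
      ([], (l2.length : Int) - 1)
    String.ofList (st.1 ++ PySem.List.slice l1 (some (l2.length : Int)) none
                        ++ PySem.List.slice l2 (some (l1.length : Int)) none)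
  else
    let st := (PySem.List.pyRange 0 (l1.length : Int) 1).foldl
      (fun (p : List Char × Int) i =>
        (p.1 ++ [PySem.List.pyGetD l1 i ' '] ++ [PySem.List.pyGetD l2 p.2 ' '], p.2 - 1))
      ([], (l1.length : Int) - 1)
    String.ofList (st.1 ++ PySem.List.slice l2 (some (l1.length : Int)) none)

-- ===== PORT B =====
-- model of Python's extended-slice assignment out[s::2] = vals: write vals into positions s, s+2, s+4, …
def pvAssign2 (buf : List Char) (start : Nat) (vals : List Char) : List Char :=
  match vals with
  | [] => buf
  | v :: vs => pvAssign2 (buf.set start v) (start + 2) vs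

-- literal port of Source B: preallocate a 2n buffer, scatter s1[:n] into even slots and s2[:n][::-1] into odd slots, join, append the tail
def my_patt_alt (s1 : String) (s2 : String) : String :=
  let l1 := s1.toList
  let l2 := s2.toList
  let n := min l1.length l2.length
  let out := pvAssign2 (pvAssign2 (List.replicate (2 * n) ' ') 0 (l1.take n)) 1 ((l2.take n).reverse)
  let tail := if l1.length > n then l1.drop n else l2.drop n
  String.ofList (out ++ tail)

-- ===== PRECONDITION & SPEC =====
def Spec_my_patt (s1 : String) (s2 : String) (out : String) : Prop := out = my_patt_alt s1 s2
instance (s1 : String) (s2 : String) (out : String) : Decidable (Spec_my_patt s1 s2 out) := by unfold Spec_my_patt; infer_instance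

-- ===== CLAIM =====
def Claim_equal_my_patt : Prop := ∀ (s1 : String) (s2 : String), Dom_my_patt s1 s2 → Spec_my_patt s1 s2 (my_patt s1 s2)

-- ===== LEMMAS AND PROOFS =====

-- writing with stride 2 past two fixed cells just shifts
theorem assign2_cons2 (vs : List Char) : ∀ (a b : Char) (l : List Char) (s : Nat),
    pvAssign2 (a :: b :: l) (s + 2) vs = a :: b :: pvAssign2 l s vs := by
  induction vs with
  | nil => intro a b l s; simp [pvAssign2]
  | cons v vs ih =>
    intro a b l s
    simp only [pvAssign2, List.set]
    exact ih a b (l.set s v) (s + 2)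

-- the two scatter writes into a fresh 2n buffer produce exactly the interleaving
theorem assign2_interleave (d : Char) : ∀ (xs ys : List Char), xs.length = ys.length →
    pvAssign2 (pvAssign2 (List.replicate (2 * xs.length) d) 0 xs) 1 ys
      = (xs.zip ys).flatMap (fun p => [p.1, p.2]) := by
  intro xs
  induction xs with
  | nil =>
    intro ys h
    have hys : ys = [] := by cases ys <;> simp_all
    subst hys
    simp [pvAssign2]
  | cons x xs ih =>
    intro ys h
    cases ys with
    | nil => simp at h
    | cons y ys =>
      have hrep : List.replicate (2 * (x :: xs).length) d
          = d :: d :: List.replicate (2 * xs.length) d := by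
        have : 2 * (x :: xs).length = 2 + 2 * xs.length := by simp [List.length_cons]; ring
        rw [this, List.replicate_add]
        simp [List.replicate]
      rw [hrep]
      simp only [pvAssign2, List.set]
      rw [assign2_cons2 xs x d (List.replicate (2 * xs.length) d) 0]
      simp only [List.set]
      rw [assign2_cons2 ys x y (pvAssign2 (List.replicate (2 * xs.length) d) 0 xs) 1]
      have hlen : xs.length = ys.length := by simpa using h
      rw [ih ys hlen]
      simp

-- assign2_interleave stated at an explicit buffer size
theorem assign2_interleave' (d : Char) (xs ys : List Char) (n : Nat)
    (h1 : xs.length = n) (h2 : ys.length = n) :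
    pvAssign2 (pvAssign2 (List.replicate (2 * n) d) 0 xs) 1 ys
      = (xs.zip ys).flatMap (fun p => [p.1, p.2]) := by
  subst h1
  exact assign2_interleave d xs ys (by omega)

-- A's loop with counter c = n-1-i equals the zip-with-reversed-prefix interleave
theorem loop_spec (x y : List Char) :
    ∀ (m : Nat) (i : Nat) (acc : List Char), i + m ≤ x.length → i + m ≤ y.length →
    ((PySem.List.pyRange (i : Int) ((i + m : Nat) : Int) 1).foldl
      (fun (p : List Char × Int) j =>
        (p.1 ++ [PySem.List.pyGetD x j ' '] ++ [PySem.List.pyGetD y p.2 ' '], p.2 - 1))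
      (acc, (m : Int) - 1)).1
    = acc ++ (((x.drop i).take m).zip ((y.take m).reverse)).flatMap (fun p => [p.1, p.2]) := by
  intro m
  induction m with
  | zero =>
    intro i acc _ _
    simp [PySem.List.pyRange_one_eq_nil]
  | succ m ih =>
    intro i acc hx hy
    rw [PySem.List.pyRange_one_cons (by omega)]
    simp only [List.foldl_cons]
    have hxi : (i : Int) < x.length := by omega
    rw [PySem.List.pyGetD_eq_getElem x ' ' (by positivity) (by exact_mod_cast hxi)]
    rw [PySem.List.pyGetD_eq_getElem y ' ' (by push_cast; omega) (by push_cast; omega)]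
    have hstep : ((i : Int) + 1) = ((i + 1 : Nat) : Int) := by push_cast; ring
    have hend : ((i + (m + 1) : Nat) : Int) = ((i + 1 + m : Nat) : Int) := by push_cast; ring
    have hc : ((m + 1 : Nat) : Int) - 1 - 1 = (m : Int) - 1 := by push_cast; ring
    rw [hend, hstep, hc]
    rw [ih (i + 1) _ (by omega) (by omega)]
    have hxd : x.drop i = x[i] :: x.drop (i + 1) := List.drop_eq_getElem_cons (by omega)
    have hyt : y.take (m + 1) = y.take m ++ [y[m]] := by
      rw [List.take_add_one]
      congr 1
      simp [List.getElem?_eq_getElem (by omega : m < y.length)]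
    rw [hxd, hyt]
    simp only [List.reverse_append, List.reverse_singleton, List.singleton_append,
      List.take_succ_cons, List.zip_cons_cons, List.flatMap_cons]
    simp

-- core equality on the list level
theorem my_patt_eq_alt (s1 s2 : String) : my_patt s1 s2 = my_patt_alt s1 s2 := by
  unfold my_patt my_patt_alt
  set x := s1.toList with hx
  set y := s2.toList with hy
  by_cases h : x.length ≥ y.length
  · simp only [h, if_pos]
    have hmin : min x.length y.length = y.length := by omega
    have hloop := loop_spec x y y.length 0 [] (by omega) (by omega)
    simp only [Nat.zero_add, Nat.cast_zero, List.drop_zero] at hloop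
    rw [hloop, hmin]
    rw [assign2_interleave' ' ' (x.take y.length) ((y.take y.length).reverse) y.length
      (by simp; omega) (by simp)]
    rw [PySem.List.slice_from_natCast, PySem.List.slice_from_natCast]
    by_cases hgt : x.length > y.length
    · simp [hgt, List.drop_eq_nil_of_le (le_of_lt hgt)]
    · have hxe : x.length = y.length := by omega
      simp [hxe]
  · simp only [h, if_false]
    have hlt : x.length < y.length := by omega
    have hmin : min x.length y.length = x.length := by omega
    have hloop := loop_spec x y x.length 0 [] (by omega) (by omega)
    simp only [Nat.zero_add, Nat.cast_zero, List.drop_zero] at hloop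
    rw [hloop, hmin]
    rw [assign2_interleave' ' ' (x.take x.length) ((y.take x.length).reverse) x.length
      (by simp) (by simp; omega)]
    rw [PySem.List.slice_from_natCast]
    simp

-- ===== VERDICT =====
theorem my_patt_spec : Claim_equal_my_patt := by
  intro s1 s2 _
  unfold Spec_my_patt
  exact my_patt_eq_alt s1 s2
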